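-- pv_equiv track=rewrite | github.com/Fishcuit/AhluicSim | forShane/simOutput2.py | dfs_wild
-- ===== SOURCE A (Python) =====
-- def dfs_wild(i, j, grid, wild='WD'):
--     symbol = grid[i][j]
--     if symbol != wild:
--         return set()
--
--     stack = [(i, j)]
--     visited = set()
--     cluster_cells = set()
--     while stack:
--         x, y = stack.pop()
--         if (x, y) in visited:
--             continue
--         visited.add((x, y))
--         cluster_cells.add((x, y))
--         for dx, dy in [(0, 1), (0, -1), (1, 0), (-1, 0)]:
--             nx, ny = x + dx, y + dy
--             if 0 <= nx < len(grid) and 0 <= ny < len(grid[0]) and grid[nx][ny] == wild: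
--                 stack.append((nx, ny))
--
--     return cluster_cells if len(cluster_cells) >= 4 else set()
-- ===== SOURCE B (Python) =====
-- def dfs_wild(i, j, grid, wild='WD'):
--     if grid[i][j] != wild:
--         return set()
--     h, w = len(grid), len(grid[0])
--     cluster = {(i, j)}
--     changed = True
--     while changed:
--         changed = False
--         add = set()
--         for x in range(h):
--             for y in range(w):
--                 if grid[x][y] == wild and (x, y) not in cluster and any(
--                         nb in cluster for nb in ((x, y + 1), (x, y - 1), (x + 1, y), (x - 1, y))):
--                     add.add((x, y))
--         if add:
--             cluster |= add
--             changed = True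
--     return cluster if len(cluster) >= 4 else set()
-- ===== Notes on version B (the rewrite author's own statement) =====
-- stated objective: alternative
-- what changed: Replaced the LIFO-stack flood fill by an iterated closure (label propagation): repeatedly scan the whole grid and add every wild cell that touches the current cluster, until a full scan adds nothing; no stack/worklist at all.
-- outside the precondition, e.g. on dfs_wild(0, 0, [['WD'], ['x'], []], 'WD'): A returns set(), B raises IndexError
import Mathlib
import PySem

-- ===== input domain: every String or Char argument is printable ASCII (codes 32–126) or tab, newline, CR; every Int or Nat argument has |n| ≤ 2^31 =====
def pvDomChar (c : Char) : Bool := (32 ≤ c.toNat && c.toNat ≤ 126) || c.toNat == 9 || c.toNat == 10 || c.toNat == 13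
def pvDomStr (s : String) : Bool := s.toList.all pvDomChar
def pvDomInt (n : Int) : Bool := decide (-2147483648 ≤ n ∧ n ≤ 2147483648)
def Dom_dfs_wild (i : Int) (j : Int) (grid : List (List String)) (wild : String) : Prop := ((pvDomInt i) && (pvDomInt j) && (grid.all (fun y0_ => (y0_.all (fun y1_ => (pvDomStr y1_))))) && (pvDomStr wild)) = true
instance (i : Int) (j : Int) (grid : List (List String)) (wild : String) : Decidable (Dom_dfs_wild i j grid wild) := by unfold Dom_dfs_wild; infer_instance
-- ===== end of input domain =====

-- B replaces A's LIFO-stack flood fill by an iterated closure (label propagation): scan the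
-- whole grid repeatedly, adding every wild cell adjacent to the current cluster, until a scan
-- adds nothing. Both Pythons return a SET; set iteration order is not modelled (PySem.Set), so
-- both ports return the cluster's elements in ascending (row, col) order — exact as a set.

-- ===== PORT A =====
-- all in-bounds cells (0 ≤ x < len(grid), 0 ≤ y < len(grid[0]))
def pvInb (grid : List (List String)) : List (Int × Int) :=
  (List.range grid.length).flatMap (fun x => (List.range (grid.headD []).length).map (fun y => (Int.ofNat x, Int.ofNat y)))

-- every cell A can ever push: the start plus the in-bounds cells
def pvU (i : Int) (j : Int) (grid : List (List String)) : List (Int × Int) := (i, j) :: pvInb grid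

-- termination measure: how many cells of U are not yet visited
def pvMu (U v : List (Int × Int)) : Nat := (U.filter (fun c => !(v.contains c))).length

theorem pv_filter_le {α : Type} (l : List α) (p q : α → Bool) (himp : ∀ x, q x = true → p x = true) :
    (l.filter q).length ≤ (l.filter p).length := by
  induction l with
  | nil => simp
  | cons a t ih =>
    cases hq : q a with
    | true => simp [List.filter, hq, himp a hq]; omega
    | false => cases hp : p a <;> simp [List.filter, hq, hp] <;> omega

theorem pv_filter_lt {α : Type} (l : List α) (p q : α → Bool) (himp : ∀ x, q x = true → p x = true)
    (c : α) (hc : c ∈ l) (hp : p c = true) (hq : q c = false) :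
    (l.filter q).length < (l.filter p).length := by
  induction l with
  | nil => cases hc
  | cons a t ih =>
    rcases List.mem_cons.mp hc with rfl | hmem
    · have hle : (t.filter q).length ≤ (t.filter p).length := pv_filter_le t p q himp
      simp [List.filter, hp, hq]; omega
    · cases hqa : q a with
      | true =>
        have hpa := himp a hqa
        simp only [List.filter, hqa, hpa]
        simpa using ih hmem
      | false =>
        cases hpa : p a with
        | true => simp only [List.filter, hqa, hpa]; have := ih hmem; simp; omega
        | false => simp only [List.filter, hqa, hpa]; exact ih hmem

theorem pvMu_sub_lt (U v w : List (Int × Int)) (hsub : ∀ x ∈ v, x ∈ w)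
    (c : Int × Int) (hU : c ∈ U) (hv : c ∉ v) (hw : c ∈ w) : pvMu U w < pvMu U v := by
  have himp : ∀ x : Int × Int, (!w.contains x) = true → (!v.contains x) = true := by
    intro x hx
    have hx' : x ∉ w := by simpa using hx
    have : x ∉ v := fun hxv => hx' (hsub x hxv)
    simpa using this
  have hp : (!v.contains c) = true := by simpa using hv
  have hq : (!w.contains c) = false := by simpa using hw
  exact pv_filter_lt U _ _ himp c hU hp hq

theorem pvMu_add_lt (U v : List (Int × Int)) (c : Int × Int) (hU : c ∈ U) (hv : c ∉ v) :
    pvMu U (PySem.Set.add v c) < pvMu U v :=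
  pvMu_sub_lt U v _ (fun x hx => by simp [PySem.Set.mem_add, hx]) c hU hv
    (by simp [PySem.Set.mem_add])

-- A's neighbour guard: 0 <= nx < len(grid) and 0 <= ny < len(grid[0]) and grid[nx][ny] == wild
-- (the inner pyGet? is none exactly where Python's grid[nx][ny] would raise on a ragged row — outside Pre_)
def pvGuard (grid : List (List String)) (wild : String) (nx ny : Int) : Bool :=
  decide (0 ≤ nx) && decide (nx < (grid.length : Int)) && decide (0 ≤ ny) &&
    decide (ny < ((grid.headD []).length : Int)) &&
    ((PySem.List.pyGet? grid nx).bind (fun row => PySem.List.pyGet? row ny) == some wild)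

theorem mem_pvInb (grid : List (List String)) (p : Int × Int) :
    p ∈ pvInb grid ↔ (0 ≤ p.1 ∧ p.1 < (grid.length : Int) ∧ 0 ≤ p.2 ∧ p.2 < ((grid.headD []).length : Int)) := by
  obtain ⟨nx, ny⟩ := p
  simp only [pvInb, List.mem_flatMap, List.mem_map, List.mem_range, Prod.mk.injEq]
  constructor
  · rintro ⟨a, ha, y, hy, h1, h2⟩
    simp only [Int.ofNat_eq_natCast] at h1 h2
    omega
  · rintro ⟨h1, h2, h3, h4⟩
    refine ⟨nx.toNat, by omega, ny.toNat, by omega, ?_, ?_⟩ <;>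
      simp only [Int.ofNat_eq_natCast] <;> omega

theorem pv_guard_mem_inb (grid : List (List String)) (wild : String) (nx ny : Int)
    (h : pvGuard grid wild nx ny = true) : (nx, ny) ∈ pvInb grid := by
  simp only [pvGuard, Bool.and_eq_true, decide_eq_true_eq] at h
  obtain ⟨⟨⟨⟨h1, h2⟩, h3⟩, h4⟩, _⟩ := h
  exact (mem_pvInb grid (nx, ny)).mpr ⟨h1, h2, h3, h4⟩

def pvDirs : List (Int × Int) := [(0, 1), (0, -1), (1, 0), (-1, 0)]

theorem pv_push_mem (grid : List (List String)) (wild : String) (i j : Int) (c : Int × Int) :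
    ∀ (ds : List (Int × Int)) (acc : List (Int × Int)), (∀ x ∈ acc, x ∈ pvU i j grid) →
    ∀ x ∈ ds.foldl (fun st d => if pvGuard grid wild (c.1 + d.1) (c.2 + d.2) then (c.1 + d.1, c.2 + d.2) :: st else st) acc,
      x ∈ pvU i j grid := by
  intro ds
  induction ds with
  | nil => intro acc hacc x hx; exact hacc x hx
  | cons d t ih =>
    intro acc hacc x hx
    refine ih _ ?_ x hx
    intro y hy
    by_cases hg : pvGuard grid wild (c.1 + d.1) (c.2 + d.2) = true
    · simp [hg] at hy
      rcases hy with rfl | hy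
      · exact List.mem_cons_of_mem _ (pv_guard_mem_inb grid wild _ _ hg)
      · exact hacc y hy
    · simp [hg] at hy; exact hacc y hy

set_option maxHeartbeats 1000000 in
-- the while loop of A; stack top-first (push = cons, pop = head) — same pops, same sets;
-- hst is the termination invariant (everything on the stack is the start or an in-bounds cell)
def pvLoopA (grid : List (List String)) (wild : String) (i j : Int)
    (stack : List (Int × Int)) (visited cluster : List (Int × Int))
    (hst : ∀ c ∈ stack, c ∈ pvU i j grid) : List (Int × Int) :=
  match stack with
  | [] => cluster
  | c :: rest =>
    if hv : c ∈ visited then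
      pvLoopA grid wild i j rest visited cluster (fun x hx => hst x (List.mem_cons_of_mem _ hx))
    else
      pvLoopA grid wild i j
        (pvDirs.foldl (fun st d => if pvGuard grid wild (c.1 + d.1) (c.2 + d.2) then (c.1 + d.1, c.2 + d.2) :: st else st) rest)
        (PySem.Set.add visited c) (PySem.Set.add cluster c)
        (pv_push_mem grid wild i j c pvDirs rest (fun x hx => hst x (List.mem_cons_of_mem _ hx)))
termination_by (pvMu (pvU i j grid) visited, stack.length)
decreasing_by
  · exact Prod.Lex.right (pvMu (pvU i j grid) visited) (Nat.lt_succ_self rest.length)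
  · exact Prod.Lex.left _ _ (pvMu_add_lt _ _ _ (hst c List.mem_cons_self) hv)

def dfs_wild (i : Int) (j : Int) (grid : List (List String)) (wild : String) : List (Int × Int) :=
  match PySem.List.pyGet? grid i with
  | none => []          -- Python: IndexError (outside Pre_)
  | some row =>
    match PySem.List.pyGet? row j with
    | none => []        -- Python: IndexError (outside Pre_)
    | some symbol =>
      if symbol ≠ wild then []
      else
        let cluster := pvLoopA grid wild i j [(i, j)] [] []
          (by intro c hc; rw [List.mem_singleton] at hc; subst hc; exact List.mem_cons_self)
        if 4 ≤ cluster.length then PySem.List.sorted2 cluster (fun p => p.1) (fun p => p.2) false else []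

-- ===== PORT B =====
-- the four neighbour cells ((x,y+1),(x,y-1),(x+1,y),(x-1,y)) that B tests for membership
def pvNbrs (q : Int × Int) : List (Int × Int) :=
  [(q.1, q.2 + 1), (q.1, q.2 - 1), (q.1 + 1, q.2), (q.1 - 1, q.2)]

-- one full scan of the grid: the set `add` B collects — every in-bounds wild cell not yet in the
-- cluster with a neighbour in the cluster (the double for-loop with its if, as a filter)
def pvScan (grid : List (List String)) (wild : String) (cl : List (Int × Int)) : List (Int × Int) :=
  (pvInb grid).filter (fun q =>
    ((PySem.List.pyGet? grid q.1).bind (fun row => PySem.List.pyGet? row q.2) == some wild) &&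
    !(cl.contains q) && (pvNbrs q).any (fun nb => cl.contains nb))

-- B's while loop: rescan and merge until a scan adds nothing (`add` inlined as pvScan)
def pvClose (grid : List (List String)) (wild : String) (cl : List (Int × Int)) : List (Int × Int) :=
  if h : pvScan grid wild cl = [] then cl else pvClose grid wild (cl ++ pvScan grid wild cl)
termination_by pvMu (pvInb grid) cl
decreasing_by
  obtain ⟨q, hq⟩ := List.exists_mem_of_ne_nil _ h
  have hq' := List.mem_filter.mp hq
  refine pvMu_sub_lt (pvInb grid) cl _ (fun x hxm => List.mem_append.mpr (Or.inl hxm))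
    q hq'.1 ?_ (List.mem_append.mpr (Or.inr hq))
  have := hq'.2
  simp only [Bool.and_eq_true, Bool.not_eq_true', List.contains_eq_mem, decide_eq_false_iff_not] at this
  exact this.1.2

def dfs_wild_alt (i : Int) (j : Int) (grid : List (List String)) (wild : String) : List (Int × Int) :=
  match (PySem.List.pyGet? grid i).bind (fun row => PySem.List.pyGet? row j) with
  | none => []          -- Python: IndexError (outside Pre_)
  | some symbol =>
    if symbol ≠ wild then []
    else
      let cluster := pvClose grid wild [(i, j)]
      if 4 ≤ cluster.length then PySem.List.sorted2 cluster (fun p => p.1) (fun p => p.2) false else []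

-- ===== PRECONDITION & SPEC =====
-- Pre_ excludes exactly the calls on which A raises IndexError: an out-of-range i or j, and, when the
-- start cell IS wild (so the flood fill runs), ragged grids with a row shorter than len(grid[0]) —
-- on a few such ragged grids A's fill never reaches the short row and A still returns while B's
-- full-grid scan raises; those are excluded too (see cites).
def Pre_dfs_wild (i : Int) (j : Int) (grid : List (List String)) (wild : String) : Prop :=
  (-(grid.length : Int) ≤ i ∧ i < (grid.length : Int)) ∧
  (-((((PySem.List.pyGet? grid i).getD []).length : Int)) ≤ j ∧ j < (((PySem.List.pyGet? grid i).getD []).length : Int)) ∧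
  (PySem.List.pyGet? ((PySem.List.pyGet? grid i).getD []) j = some wild →
    ∀ r ∈ grid, (grid.headD []).length ≤ r.length)

instance (i : Int) (j : Int) (grid : List (List String)) (wild : String) : Decidable (Pre_dfs_wild i j grid wild) := by
  unfold Pre_dfs_wild; infer_instance

def pvWitness_dfs_wild : Int × Int × List (List String) × String :=
  (0, 0, [["WD", "WD"], ["WD", "WD"]], "WD")

def Spec_dfs_wild (i : Int) (j : Int) (grid : List (List String)) (wild : String) (out : List (Int × Int)) : Prop := out = dfs_wild_alt i j grid wild
instance (i : Int) (j : Int) (grid : List (List String)) (wild : String) (out : List (Int × Int)) : Decidable (Spec_dfs_wild i j grid wild out) := by unfold Spec_dfs_wild; infer_instance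

-- ===== CLAIM (what is proved, stated in full; the proofs are below) =====
def Claim_equal_dfs_wild : Prop := ∀ (i : Int) (j : Int) (grid : List (List String)) (wild : String), Dom_dfs_wild i j grid wild → Pre_dfs_wild i j grid wild → Spec_dfs_wild i j grid wild (dfs_wild i j grid wild)

-- ===== LEMMAS AND PROOFS =====

def pvAdjG (grid : List (List String)) (wild : String) (c x : Int × Int) : Prop :=
  (x = (c.1, c.2 + 1) ∧ pvGuard grid wild c.1 (c.2 + 1) = true) ∨
  (x = (c.1, c.2 - 1) ∧ pvGuard grid wild c.1 (c.2 - 1) = true) ∨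
  (x = (c.1 + 1, c.2) ∧ pvGuard grid wild (c.1 + 1) c.2 = true) ∨
  (x = (c.1 - 1, c.2) ∧ pvGuard grid wild (c.1 - 1) c.2 = true)

inductive pvRF (grid : List (List String)) (wild : String) : (Int × Int) → (Int × Int) → Prop
  | refl (a : Int × Int) : pvRF grid wild a a
  | tail {a b c : Int × Int} : pvRF grid wild a b → pvAdjG grid wild b c → pvRF grid wild a c

theorem pvRF_trans {grid : List (List String)} {wild : String} {a b c : Int × Int}
    (h1 : pvRF grid wild a b) (h2 : pvRF grid wild b c) : pvRF grid wild a c := by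
  induction h2 with
  | refl => exact h1
  | tail _ hadj ih => exact pvRF.tail ih hadj

theorem pvRF_single {grid : List (List String)} {wild : String} {a b : Int × Int}
    (h : pvAdjG grid wild a b) : pvRF grid wild a b := pvRF.tail (pvRF.refl a) h

theorem pv_mem_push (grid : List (List String)) (wild : String) (c x : Int × Int)
    (rest : List (Int × Int)) :
    x ∈ pvDirs.foldl (fun st d => if pvGuard grid wild (c.1 + d.1) (c.2 + d.2) then (c.1 + d.1, c.2 + d.2) :: st else st) rest
    ↔ pvAdjG grid wild c x ∨ x ∈ rest := by
  simp only [pvDirs, List.foldl_cons, List.foldl_nil, Int.add_zero, ← Int.sub_eq_add_neg]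
  by_cases g1 : pvGuard grid wild c.1 (c.2 + 1) <;>
  by_cases g2 : pvGuard grid wild c.1 (c.2 - 1) <;>
  by_cases g3 : pvGuard grid wild (c.1 + 1) c.2 <;>
  by_cases g4 : pvGuard grid wild (c.1 - 1) c.2 <;>
    simp [g1, g2, g3, g4, pvAdjG] <;> tauto

theorem pvLoopA_char (grid : List (List String)) (wild : String) (i j : Int) :
    ∀ (stack visited cluster : List (Int × Int)) (hst : ∀ c ∈ stack, c ∈ pvU i j grid),
    visited = cluster →
    (∀ p ∈ cluster, p ∈ pvLoopA grid wild i j stack visited cluster hst) ∧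
    (∀ p ∈ stack, p ∈ pvLoopA grid wild i j stack visited cluster hst) ∧
    (cluster.Nodup → (pvLoopA grid wild i j stack visited cluster hst).Nodup) ∧
    (∀ p ∈ pvLoopA grid wild i j stack visited cluster hst,
      p ∈ cluster ∨ ∃ q ∈ stack, pvRF grid wild q p) ∧
    ((∀ p ∈ cluster, ∀ x, pvAdjG grid wild p x → x ∈ cluster ∨ x ∈ stack) →
      ∀ p ∈ pvLoopA grid wild i j stack visited cluster hst, ∀ x, pvAdjG grid wild p x →
        x ∈ pvLoopA grid wild i j stack visited cluster hst) := by
  intro stack visited cluster hst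
  induction stack, visited, cluster, hst using pvLoopA.induct grid wild i j with
  | case1 visited cluster hst _ =>
    intro _
    rw [pvLoopA]
    refine ⟨fun p hp => hp, by simp, fun h => h, fun p hp => Or.inl hp, ?_⟩
    intro hcl p hp x hadj
    rcases hcl p hp x hadj with hx | hx
    · exact hx
    · cases hx
  | case2 visited cluster c rest hst hv _ ih =>
    intro hvc
    rw [pvLoopA]
    simp only [dif_pos hv]
    obtain ⟨ih1, ih2, ih3, ih4, ih5⟩ := ih hvc
    have hcc : c ∈ cluster := hvc ▸ hv
    refine ⟨ih1, ?_, ih3, ?_, ?_⟩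
    · intro p hp
      rcases List.mem_cons.mp hp with rfl | hp
      · exact ih1 p hcc
      · exact ih2 p hp
    · intro p hp
      rcases ih4 p hp with h | ⟨q, hq, hrf⟩
      · exact Or.inl h
      · exact Or.inr ⟨q, List.mem_cons_of_mem _ hq, hrf⟩
    · intro hcl
      apply ih5
      intro p hp x hadj
      rcases hcl p hp x hadj with hx | hx
      · exact Or.inl hx
      · rcases List.mem_cons.mp hx with rfl | hx
        · exact Or.inl hcc
        · exact Or.inr hx
  | case3 visited cluster c rest hst hv _ ih =>
    intro hvc
    rw [pvLoopA]
    simp only [dif_neg hv]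
    obtain ⟨ih1, ih2, ih3, ih4, ih5⟩ := ih (by rw [hvc])
    have hmem_push : ∀ x, x ∈ (pvDirs.foldl (fun st d => if pvGuard grid wild (c.1 + d.1) (c.2 + d.2) then (c.1 + d.1, c.2 + d.2) :: st else st) rest) ↔ pvAdjG grid wild c x ∨ x ∈ rest :=
      fun x => pv_mem_push grid wild c x rest
    have hsubc : ∀ p ∈ cluster, p ∈ PySem.Set.add cluster c := by
      intro p hp; rw [PySem.Set.mem_add]; exact Or.inl hp
    have hcin : c ∈ PySem.Set.add cluster c := by rw [PySem.Set.mem_add]; exact Or.inr rfl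
    refine ⟨fun p hp => ih1 p (hsubc p hp), ?_, ?_, ?_, ?_⟩
    · intro p hp
      rcases List.mem_cons.mp hp with rfl | hp
      · exact ih1 p hcin
      · exact ih2 p ((hmem_push p).mpr (Or.inr hp))
    · intro hnd
      exact ih3 (PySem.Set.nodup_add cluster c hnd)
    · intro p hp
      rcases ih4 p hp with h | ⟨q, hq, hrf⟩
      · rw [PySem.Set.mem_add] at h
        rcases h with h | rfl
        · exact Or.inl h
        · exact Or.inr ⟨p, List.mem_cons_self, pvRF.refl p⟩
      · rcases (hmem_push q).mp hq with hadj | hq'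
        · exact Or.inr ⟨c, List.mem_cons_self, pvRF_trans (pvRF_single hadj) hrf⟩
        · exact Or.inr ⟨q, List.mem_cons_of_mem _ hq', hrf⟩
    · intro hcl
      apply ih5
      intro p hp x hadj
      rw [PySem.Set.mem_add] at hp
      rcases hp with hp | rfl
      · rcases hcl p hp x hadj with hx | hx
        · exact Or.inl (hsubc x hx)
        · rcases List.mem_cons.mp hx with rfl | hx
          · exact Or.inl hcin
          · exact Or.inr ((hmem_push x).mpr (Or.inr hx))
      · exact Or.inr ((hmem_push x).mpr (Or.inl hadj))

theorem pvLoopA_final (grid : List (List String)) (wild : String) (i j : Int)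
    (h0 : ∀ c ∈ [(i, j)], c ∈ pvU i j grid) :
    (∀ p, p ∈ pvLoopA grid wild i j [(i, j)] [] [] h0 ↔ pvRF grid wild (i, j) p) ∧
    (pvLoopA grid wild i j [(i, j)] [] [] h0).Nodup := by
  obtain ⟨h1, h2, h3, h4, h5⟩ := pvLoopA_char grid wild i j [(i, j)] [] [] h0 rfl
  have hclosed : ∀ p ∈ pvLoopA grid wild i j [(i, j)] [] [] h0, ∀ x, pvAdjG grid wild p x →
      x ∈ pvLoopA grid wild i j [(i, j)] [] [] h0 := h5 (by simp)
  refine ⟨fun p => ⟨?_, ?_⟩, h3 List.nodup_nil⟩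
  · intro hp
    rcases h4 p hp with h | ⟨q, hq, hrf⟩
    · cases h
    · rw [List.mem_singleton] at hq; subst hq; exact hrf
  · intro hrf
    induction hrf with
    | refl => exact h2 (i, j) List.mem_cons_self
    | tail hab hadj ih => exact hclosed _ ih _ hadj

-- B-side characterisation ------------------------------------------------

theorem pv_nbrs_adj (grid : List (List String)) (wild : String) (c q : Int × Int) :
    (c ∈ pvNbrs q ∧ pvGuard grid wild q.1 q.2 = true) ↔ pvAdjG grid wild c q := by
  obtain ⟨x, y⟩ := q
  obtain ⟨a, b⟩ := c
  constructor
  · rintro ⟨hm, hg⟩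
    simp only [pvNbrs, List.mem_cons, List.not_mem_nil, or_false, Prod.mk.injEq] at hm
    rcases hm with ⟨rfl, rfl⟩ | ⟨rfl, rfl⟩ | ⟨rfl, rfl⟩ | ⟨rfl, rfl⟩
    · exact Or.inr (Or.inl ⟨by simp, by simpa using hg⟩)
    · exact Or.inl ⟨by simp, by simpa using hg⟩
    · exact Or.inr (Or.inr (Or.inr ⟨by simp, by simpa using hg⟩))
    · exact Or.inr (Or.inr (Or.inl ⟨by simp, by simpa using hg⟩))
  · rintro (⟨he, hg⟩ | ⟨he, hg⟩ | ⟨he, hg⟩ | ⟨he, hg⟩) <;>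
    · rw [Prod.mk.injEq] at he
      obtain ⟨rfl, rfl⟩ := he
      exact ⟨by simp [pvNbrs, Prod.mk.injEq], hg⟩

theorem pv_mem_scan (grid : List (List String)) (wild : String) (cl : List (Int × Int)) (q : Int × Int) :
    q ∈ pvScan grid wild cl ↔ (pvGuard grid wild q.1 q.2 = true ∧ q ∉ cl ∧ ∃ c ∈ cl, pvAdjG grid wild c q) := by
  simp only [pvScan, List.mem_filter, Bool.and_eq_true, Bool.not_eq_true', List.contains_eq_mem,
    decide_eq_false_iff_not, List.any_eq_true, decide_eq_true_eq, beq_iff_eq]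
  constructor
  · rintro ⟨hin, ⟨hwild, hncl⟩, c, hcnb, hccl⟩
    have hb := (mem_pvInb grid q).mp hin
    have hg : pvGuard grid wild q.1 q.2 = true := by
      simp only [pvGuard, Bool.and_eq_true, decide_eq_true_eq, beq_iff_eq]
      exact ⟨⟨⟨⟨hb.1, hb.2.1⟩, hb.2.2.1⟩, hb.2.2.2⟩, hwild⟩
    exact ⟨hg, hncl, c, hccl, (pv_nbrs_adj grid wild c q).mp ⟨hcnb, hg⟩⟩
  · rintro ⟨hg, hncl, c, hccl, hadj⟩
    obtain ⟨hcnb, _⟩ := (pv_nbrs_adj grid wild c q).mpr hadj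
    have hwild : (PySem.List.pyGet? grid q.1).bind (fun row => PySem.List.pyGet? row q.2) = some wild := by
      simp only [pvGuard, Bool.and_eq_true, beq_iff_eq] at hg
      exact hg.2
    exact ⟨pv_guard_mem_inb grid wild q.1 q.2 hg, ⟨hwild, hncl⟩, c, hcnb, hccl⟩

theorem pvInb_nodup (grid : List (List String)) : (pvInb grid).Nodup := by
  unfold pvInb
  rw [List.nodup_flatMap]
  refine ⟨?_, ?_⟩
  · intro x _
    exact List.nodup_range.map (fun a b h => by
      exact Int.ofNat.inj (congrArg Prod.snd h))
  · refine List.nodup_range.imp ?_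
    intro a b hne
    simp only [Function.onFun, List.Disjoint]
    intro p hp1 hp2
    simp only [List.mem_map] at hp1 hp2
    obtain ⟨y1, _, rfl⟩ := hp1
    obtain ⟨y2, _, he⟩ := hp2
    exact hne (Int.ofNat.inj (congrArg Prod.fst he)).symm

theorem pv_scan_nodup (grid : List (List String)) (wild : String) (cl : List (Int × Int)) :
    (pvScan grid wild cl).Nodup :=
  List.Nodup.filter _ (pvInb_nodup grid)

theorem pvClose_char (grid : List (List String)) (wild : String) :
    ∀ cl : List (Int × Int),
    (∀ p ∈ cl, p ∈ pvClose grid wild cl) ∧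
    (cl.Nodup → (pvClose grid wild cl).Nodup) ∧
    (∀ p ∈ pvClose grid wild cl, ∃ c ∈ cl, pvRF grid wild c p) ∧
    (∀ p ∈ pvClose grid wild cl, ∀ x, pvAdjG grid wild p x → x ∈ pvClose grid wild cl) := by
  intro cl
  induction cl using pvClose.induct grid wild with
  | case1 cl hnil =>
    rw [pvClose]
    simp only [dif_pos hnil]
    refine ⟨fun p hp => hp, fun h => h, fun p hp => ⟨p, hp, pvRF.refl p⟩, ?_⟩
    intro p hp x hadj
    by_contra hxn
    have : x ∈ pvScan grid wild cl := by
      rw [pv_mem_scan]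
      obtain ⟨_, hg⟩ := (pv_nbrs_adj grid wild p x).mpr hadj
      exact ⟨hg, hxn, p, hp, hadj⟩
    rw [hnil] at this
    cases this
  | case2 cl hne ih =>
    rw [pvClose]
    simp only [dif_neg hne]
    obtain ⟨ih1, ih2, ih3, ih4⟩ := ih
    refine ⟨?_, ?_, ?_, ih4⟩
    · intro p hp
      exact ih1 p (List.mem_append.mpr (Or.inl hp))
    · intro hnd
      apply ih2
      refine List.Nodup.append hnd (pv_scan_nodup grid wild cl) ?_
      intro p hp1 hp2
      have := (pv_mem_scan grid wild cl p).mp hp2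
      exact this.2.1 hp1
    · intro p hp
      rcases ih3 p hp with ⟨c, hc, hrf⟩
      rcases List.mem_append.mp hc with hc | hc
      · exact ⟨c, hc, hrf⟩
      · obtain ⟨_, _, c', hc', hadj⟩ := (pv_mem_scan grid wild cl c).mp hc
        exact ⟨c', hc', pvRF_trans (pvRF_single hadj) hrf⟩

theorem pvClose_final (grid : List (List String)) (wild : String) (i j : Int) :
    (∀ p, p ∈ pvClose grid wild [(i, j)] ↔ pvRF grid wild (i, j) p) ∧
    (pvClose grid wild [(i, j)]).Nodup := by
  obtain ⟨h1, h2, h3, h4⟩ := pvClose_char grid wild [(i, j)]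
  refine ⟨fun p => ⟨?_, ?_⟩, h2 (by simp)⟩
  · intro hp
    rcases h3 p hp with ⟨q, hq, hrf⟩
    rw [List.mem_singleton] at hq; subst hq; exact hrf
  · intro hrf
    induction hrf with
    | refl => exact h1 (i, j) List.mem_cons_self
    | tail hab hadj ih => exact h4 _ ih _ hadj

-- sorted2 machinery ------------------------------------------------------

def pvLT (a b : Int × Int) : Bool := decide (a.1 < b.1) || (!decide (b.1 < a.1) && decide (a.2 < b.2))

def pvLE (a b : Int × Int) : Prop := a.1 < b.1 ∨ (a.1 = b.1 ∧ a.2 ≤ b.2)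

theorem pvLT_iff (a b : Int × Int) : pvLT a b = true ↔ (a.1 < b.1 ∨ (¬ b.1 < a.1 ∧ a.2 < b.2)) := by
  simp [pvLT]

theorem pvLE_of_LT {a b : Int × Int} (h : pvLT a b = true) : pvLE a b := by
  rw [pvLT_iff] at h; unfold pvLE; omega

theorem pvLE_of_not_LT {a b : Int × Int} (h : ¬ pvLT a b = true) : pvLE b a := by
  rw [pvLT_iff] at h; unfold pvLE; omega

theorem pvLE_trans {a b c : Int × Int} (h1 : pvLE a b) (h2 : pvLE b c) : pvLE a c := by
  unfold pvLE at *; omega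

theorem pv_insertBy_pairwise (x : Int × Int) :
    ∀ l : List (Int × Int), l.Pairwise pvLE → (PySem.List.insertBy pvLT x l).Pairwise pvLE := by
  intro l
  induction l with
  | nil => intro _; simp [PySem.List.insertBy]
  | cons y ys ih =>
    intro hp
    rw [PySem.List.insertBy]
    obtain ⟨hy, hys⟩ := List.pairwise_cons.mp hp
    by_cases h : pvLT x y = true
    · simp only [h, if_true]
      refine List.pairwise_cons.mpr ⟨?_, hp⟩
      intro z hz
      rcases List.mem_cons.mp hz with rfl | hz
      · exact pvLE_of_LT h
      · exact pvLE_trans (pvLE_of_LT h) (hy z hz)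
    · simp only [h]
      refine List.pairwise_cons.mpr ⟨?_, ih hys⟩
      intro z hz
      rcases (PySem.List.mem_insertBy pvLT x z ys).mp hz with rfl | hz
      · exact pvLE_of_not_LT h
      · exact hy z hz

theorem pv_foldl_insert_pairwise :
    ∀ (l acc : List (Int × Int)), acc.Pairwise pvLE →
      (l.foldl (fun acc x => PySem.List.insertBy pvLT x acc) acc).Pairwise pvLE := by
  intro l
  induction l with
  | nil => intro acc h; exact h
  | cons x xs ih =>
    intro acc h
    exact ih _ (pv_insertBy_pairwise x acc h)

theorem pv_sorted2_pairwise (l : List (Int × Int)) :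
    (PySem.List.sorted2 l (fun p => p.1) (fun p => p.2) false).Pairwise pvLE := by
  have he : PySem.List.sorted2 l (fun p => p.1) (fun p => p.2) false
      = l.foldl (fun acc x => PySem.List.insertBy pvLT x acc) [] := rfl
  rw [he]
  exact pv_foldl_insert_pairwise l [] (by simp)

theorem pv_sorted2_congr {l₁ l₂ : List (Int × Int)} (h : l₁.Perm l₂) :
    PySem.List.sorted2 l₁ (fun p => p.1) (fun p => p.2) false
      = PySem.List.sorted2 l₂ (fun p => p.1) (fun p => p.2) false := by
  refine List.Perm.eq_of_pairwise ?_ (pv_sorted2_pairwise l₁) (pv_sorted2_pairwise l₂) ?_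
  · intro a b _ _ hab hba
    unfold pvLE at hab hba
    rw [Prod.ext_iff]
    constructor <;> omega
  · exact (PySem.List.sorted2_perm l₁ _ _ _).trans (h.trans (PySem.List.sorted2_perm l₂ _ _ _).symm)

-- ===== VERDICT (by name: the statement is the Claim_ definition above) =====
theorem dfs_wild_spec : Claim_equal_dfs_wild := by
  intro i j grid wild _ hpre
  obtain ⟨⟨hi1, hi2⟩, ⟨hj1, hj2⟩, _⟩ := hpre
  unfold Spec_dfs_wild dfs_wild dfs_wild_alt
  rcases hgi : PySem.List.pyGet? grid i with _ | row
  · have hn := (PySem.List.pyGet?_eq_none_iff grid i).mp hgi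
    exact absurd (by simp [PySem.Raise.InRange]; omega) hn
  · rw [hgi] at hj1 hj2
    simp only [Option.getD_some] at hj1 hj2
    rcases hrj : PySem.List.pyGet? row j with _ | symbol
    · have hn := (PySem.List.pyGet?_eq_none_iff row j).mp hrj
      exact absurd (by simp [PySem.Raise.InRange]; omega) hn
    · simp only [hrj, Option.bind_some]
      by_cases hsw : symbol = wild
      · simp only [hsw, ne_eq, not_true_eq_false, if_false]
        have hA := pvLoopA_final grid wild i j
          (by intro c hc; rw [List.mem_singleton] at hc; subst hc; exact List.mem_cons_self)
        have hB := pvClose_final grid wild i j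
        obtain ⟨hAiff, hAnd⟩ := hA
        obtain ⟨hBiff, hBnd⟩ := hB
        have hiff : ∀ p, p ∈ pvLoopA grid wild i j [(i, j)] [] []
            (by intro c hc; rw [List.mem_singleton] at hc; subst hc; exact List.mem_cons_self)
            ↔ p ∈ pvClose grid wild [(i, j)] :=
          fun p => (hAiff p).trans (hBiff p).symm
        have hperm : (pvLoopA grid wild i j [(i, j)] [] []
            (by intro c hc; rw [List.mem_singleton] at hc; subst hc; exact List.mem_cons_self)).Perm
            (pvClose grid wild [(i, j)]) :=
          (List.perm_ext_iff_of_nodup hAnd hBnd).mpr hiff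
        have hlen := hperm.length_eq
        rw [hlen]
        by_cases h4 : 4 ≤ (pvClose grid wild [(i, j)]).length
        · simp only [h4, if_pos]
          exact pv_sorted2_congr hperm
        · simp only [h4, if_false]
      · simp only [hsw, ne_eq, not_false_eq_true, if_true]
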